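-- pv_equiv track=rewrite | github.com/dissonancehelix/Helix | domains/trails/tools/pipelines/ingest/enrich_entity_history.py | resolve_game_key
-- ===== SOURCE A (Python) =====
-- GAME_MAP = {
--     'fc':                        ('sky_fc',    10, 'Trails in the Sky FC'),
--     'sora fc':                   ('sky_fc',    10, 'Trails in the Sky FC'),
--     'sora 1st':                  ('sky_fc',    10, 'Trails in the Sky the 1st'),
--     'sky fc':                    ('sky_fc',    10, 'Trails in the Sky FC'),
--     'sc':                        ('sky_sc',    12, 'Trails in the Sky SC'),
--     'sora sc':                   ('sky_sc',    12, 'Trails in the Sky SC'),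
--     'sky sc':                    ('sky_sc',    12, 'Trails in the Sky SC'),
--     '3rd':                       ('sky_3rd',   14, 'Trails in the Sky the 3rd'),
--     'the 3rd':                   ('sky_3rd',   14, 'Trails in the Sky the 3rd'),
--     'sora 3rd':                  ('sky_3rd',   14, 'Trails in the Sky the 3rd'),
--     'zero':                      ('zero',      20, 'Trails from Zero'),
--     'ao':                        ('azure',     22, 'Trails to Azure'),
--     'azure':                     ('azure',     22, 'Trails to Azure'),
--     'sen':                       ('cs1',       40, 'Trails of Cold Steel'),
--     'sen i':                     ('cs1',       40, 'Trails of Cold Steel'),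
--     'cold steel':                ('cs1',       40, 'Trails of Cold Steel'),
--     'cold steel i':              ('cs1',       40, 'Trails of Cold Steel'),
--     'sen ii':                    ('cs2',       42, 'Trails of Cold Steel II'),
--     'cold steel ii':             ('cs2',       42, 'Trails of Cold Steel II'),
--     'sen iii':                   ('cs3',       50, 'Trails of Cold Steel III'),
--     'cold steel iii':            ('cs3',       50, 'Trails of Cold Steel III'),
--     'sen iv':                    ('cs4',       55, 'Trails of Cold Steel IV'),
--     'cold steel iv':             ('cs4',       55, 'Trails of Cold Steel IV'),
--     'hajimari':                  ('reverie',   65, 'Trails into Reverie'),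
--     'reverie':                   ('reverie',   65, 'Trails into Reverie'),
--     'kuro':                      ('daybreak',  70, 'Trails Through Daybreak'),
--     'kuro i':                    ('daybreak',  70, 'Trails Through Daybreak'),
--     'daybreak':                  ('daybreak',  70, 'Trails Through Daybreak'),
--     'kuro ii':                   ('daybreak2', 75, 'Trails Through Daybreak II'),
--     'daybreak ii':               ('daybreak2', 75, 'Trails Through Daybreak II'),
--     'kai':                       ('kai',       100, 'Trails Beyond the Horizon'),
--     'akatsuki':                  ('akatsuki',  20, 'Akatsuki no Kiseki'),
--     'nayuta':                    ('nayuta',    10, 'The Legend of Nayuta: Boundless Trails'),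
-- }
--
-- def resolve_game_key(raw: str) -> tuple[str | None, int, str]:
--     key = raw.strip().lower()
--     if key in GAME_MAP:
--         return GAME_MAP[key]
--     best = (None, 0, '')
--     for keyword, val in GAME_MAP.items():
--         if keyword in key and val[1] > best[1]:
--             best = val
--     return best
-- ===== SOURCE B (Python) =====
-- # B: one pre-built rule table in descending-priority order (ties keep GAME_MAP's
-- # original order), scanned once with an early exit on the first keyword that is a
-- # substring of the normalized key.  Exact keys need no separate fast path: every
-- # key is a substring of itself and no higher-ranked rule can beat its own entry.
-- _RULES = [
--     ('kai', 'kai', 100, 'Trails Beyond the Horizon'),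
--     ('kuro ii', 'daybreak2', 75, 'Trails Through Daybreak II'),
--     ('daybreak ii', 'daybreak2', 75, 'Trails Through Daybreak II'),
--     ('kuro', 'daybreak', 70, 'Trails Through Daybreak'),
--     ('kuro i', 'daybreak', 70, 'Trails Through Daybreak'),
--     ('daybreak', 'daybreak', 70, 'Trails Through Daybreak'),
--     ('hajimari', 'reverie', 65, 'Trails into Reverie'),
--     ('reverie', 'reverie', 65, 'Trails into Reverie'),
--     ('sen iv', 'cs4', 55, 'Trails of Cold Steel IV'),
--     ('cold steel iv', 'cs4', 55, 'Trails of Cold Steel IV'),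
--     ('sen iii', 'cs3', 50, 'Trails of Cold Steel III'),
--     ('cold steel iii', 'cs3', 50, 'Trails of Cold Steel III'),
--     ('sen ii', 'cs2', 42, 'Trails of Cold Steel II'),
--     ('cold steel ii', 'cs2', 42, 'Trails of Cold Steel II'),
--     ('sen', 'cs1', 40, 'Trails of Cold Steel'),
--     ('sen i', 'cs1', 40, 'Trails of Cold Steel'),
--     ('cold steel', 'cs1', 40, 'Trails of Cold Steel'),
--     ('cold steel i', 'cs1', 40, 'Trails of Cold Steel'),
--     ('ao', 'azure', 22, 'Trails to Azure'),
--     ('azure', 'azure', 22, 'Trails to Azure'),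
--     ('zero', 'zero', 20, 'Trails from Zero'),
--     ('akatsuki', 'akatsuki', 20, 'Akatsuki no Kiseki'),
--     ('3rd', 'sky_3rd', 14, 'Trails in the Sky the 3rd'),
--     ('the 3rd', 'sky_3rd', 14, 'Trails in the Sky the 3rd'),
--     ('sora 3rd', 'sky_3rd', 14, 'Trails in the Sky the 3rd'),
--     ('sc', 'sky_sc', 12, 'Trails in the Sky SC'),
--     ('sora sc', 'sky_sc', 12, 'Trails in the Sky SC'),
--     ('sky sc', 'sky_sc', 12, 'Trails in the Sky SC'),
--     ('fc', 'sky_fc', 10, 'Trails in the Sky FC'),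
--     ('sora fc', 'sky_fc', 10, 'Trails in the Sky FC'),
--     ('sora 1st', 'sky_fc', 10, 'Trails in the Sky the 1st'),
--     ('sky fc', 'sky_fc', 10, 'Trails in the Sky FC'),
--     ('nayuta', 'nayuta', 10, 'The Legend of Nayuta: Boundless Trails'),
-- ]
--
-- def resolve_game_key(raw: str) -> tuple[str | None, int, str]:
--     key = raw.strip().lower()
--     for keyword, game_id, priority, title in _RULES:
--         if keyword in key:
--             return (game_id, priority, title)
--     return (None, 0, '')
-- ===== Notes on version B (the rewrite author's own statement) =====
-- stated objective: alternative
-- what changed: A's dict fast path plus scan-all-entries-tracking-the-max fallback is replaced by a single early-exit scan of one pre-built rule table ordered by descending priority (ties in original dict order); the exact-key dict lookup disappears entirely because every key matches its own rule first.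
import Mathlib
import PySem

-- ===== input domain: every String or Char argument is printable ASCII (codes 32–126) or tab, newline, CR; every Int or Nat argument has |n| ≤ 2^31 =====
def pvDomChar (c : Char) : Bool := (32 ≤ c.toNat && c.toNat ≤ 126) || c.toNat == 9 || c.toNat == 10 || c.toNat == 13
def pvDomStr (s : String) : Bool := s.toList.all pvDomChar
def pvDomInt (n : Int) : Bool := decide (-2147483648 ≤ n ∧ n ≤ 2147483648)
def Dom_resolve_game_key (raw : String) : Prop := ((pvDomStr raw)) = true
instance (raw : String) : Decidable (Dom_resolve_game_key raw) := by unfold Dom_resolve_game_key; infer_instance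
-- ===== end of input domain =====

-- B drops A's dict fast path and scan-all-track-max fallback in favour of one early-exit
-- scan of a pre-built rule table ordered by descending priority (objective: alternative).

-- ===== PORT A =====
-- GAME_MAP (module constant; keys are distinct)
def gameMap : PySem.Dict String (Option String × Int × String) := PySem.Dict.mk [
  ("fc",             (some "sky_fc",    10, "Trails in the Sky FC")),
  ("sora fc",        (some "sky_fc",    10, "Trails in the Sky FC")),
  ("sora 1st",       (some "sky_fc",    10, "Trails in the Sky the 1st")),
  ("sky fc",         (some "sky_fc",    10, "Trails in the Sky FC")),
  ("sc",             (some "sky_sc",    12, "Trails in the Sky SC")),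
  ("sora sc",        (some "sky_sc",    12, "Trails in the Sky SC")),
  ("sky sc",         (some "sky_sc",    12, "Trails in the Sky SC")),
  ("3rd",            (some "sky_3rd",   14, "Trails in the Sky the 3rd")),
  ("the 3rd",        (some "sky_3rd",   14, "Trails in the Sky the 3rd")),
  ("sora 3rd",       (some "sky_3rd",   14, "Trails in the Sky the 3rd")),
  ("zero",           (some "zero",      20, "Trails from Zero")),
  ("ao",             (some "azure",     22, "Trails to Azure")),
  ("azure",          (some "azure",     22, "Trails to Azure")),
  ("sen",            (some "cs1",       40, "Trails of Cold Steel")),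
  ("sen i",          (some "cs1",       40, "Trails of Cold Steel")),
  ("cold steel",     (some "cs1",       40, "Trails of Cold Steel")),
  ("cold steel i",   (some "cs1",       40, "Trails of Cold Steel")),
  ("sen ii",         (some "cs2",       42, "Trails of Cold Steel II")),
  ("cold steel ii",  (some "cs2",       42, "Trails of Cold Steel II")),
  ("sen iii",        (some "cs3",       50, "Trails of Cold Steel III")),
  ("cold steel iii", (some "cs3",       50, "Trails of Cold Steel III")),
  ("sen iv",         (some "cs4",       55, "Trails of Cold Steel IV")),
  ("cold steel iv",  (some "cs4",       55, "Trails of Cold Steel IV")),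
  ("hajimari",       (some "reverie",   65, "Trails into Reverie")),
  ("reverie",        (some "reverie",   65, "Trails into Reverie")),
  ("kuro",           (some "daybreak",  70, "Trails Through Daybreak")),
  ("kuro i",         (some "daybreak",  70, "Trails Through Daybreak")),
  ("daybreak",       (some "daybreak",  70, "Trails Through Daybreak")),
  ("kuro ii",        (some "daybreak2", 75, "Trails Through Daybreak II")),
  ("daybreak ii",    (some "daybreak2", 75, "Trails Through Daybreak II")),
  ("kai",            (some "kai",       100, "Trails Beyond the Horizon")),
  ("akatsuki",       (some "akatsuki",  20, "Akatsuki no Kiseki")),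
  ("nayuta",         (some "nayuta",    10, "The Legend of Nayuta: Boundless Trails"))]

-- the body of A's fallback loop: `if keyword in key and val[1] > best[1]: best = val`
def stepA (key : String) (best : Option String × Int × String)
    (kv : String × (Option String × Int × String)) : Option String × Int × String :=
  if PySem.Str.isIn kv.1 key && decide (kv.2.2.1 > best.2.1) then kv.2 else best

def resolve_game_key (raw : String) : Option String × Int × String :=
  let key := PySem.Str.lower (PySem.Str.strip raw)
  match PySem.Dict.get? gameMap key with        -- `if key in GAME_MAP: return GAME_MAP[key]`
  | some v => v
  | none => gameMap.items.foldl (stepA key) (none, 0, "")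

-- ===== PORT B =====
-- _RULES: flat (keyword, game_id, priority, title) rows, descending priority,
-- ties in GAME_MAP's original order (Source B's hand-pre-sorted module constant)
def rulesB : List (String × String × Int × String) := [
  ("kai", "kai", 100, "Trails Beyond the Horizon"),
  ("kuro ii", "daybreak2", 75, "Trails Through Daybreak II"),
  ("daybreak ii", "daybreak2", 75, "Trails Through Daybreak II"),
  ("kuro", "daybreak", 70, "Trails Through Daybreak"),
  ("kuro i", "daybreak", 70, "Trails Through Daybreak"),
  ("daybreak", "daybreak", 70, "Trails Through Daybreak"),
  ("hajimari", "reverie", 65, "Trails into Reverie"),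
  ("reverie", "reverie", 65, "Trails into Reverie"),
  ("sen iv", "cs4", 55, "Trails of Cold Steel IV"),
  ("cold steel iv", "cs4", 55, "Trails of Cold Steel IV"),
  ("sen iii", "cs3", 50, "Trails of Cold Steel III"),
  ("cold steel iii", "cs3", 50, "Trails of Cold Steel III"),
  ("sen ii", "cs2", 42, "Trails of Cold Steel II"),
  ("cold steel ii", "cs2", 42, "Trails of Cold Steel II"),
  ("sen", "cs1", 40, "Trails of Cold Steel"),
  ("sen i", "cs1", 40, "Trails of Cold Steel"),
  ("cold steel", "cs1", 40, "Trails of Cold Steel"),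
  ("cold steel i", "cs1", 40, "Trails of Cold Steel"),
  ("ao", "azure", 22, "Trails to Azure"),
  ("azure", "azure", 22, "Trails to Azure"),
  ("zero", "zero", 20, "Trails from Zero"),
  ("akatsuki", "akatsuki", 20, "Akatsuki no Kiseki"),
  ("3rd", "sky_3rd", 14, "Trails in the Sky the 3rd"),
  ("the 3rd", "sky_3rd", 14, "Trails in the Sky the 3rd"),
  ("sora 3rd", "sky_3rd", 14, "Trails in the Sky the 3rd"),
  ("sc", "sky_sc", 12, "Trails in the Sky SC"),
  ("sora sc", "sky_sc", 12, "Trails in the Sky SC"),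
  ("sky sc", "sky_sc", 12, "Trails in the Sky SC"),
  ("fc", "sky_fc", 10, "Trails in the Sky FC"),
  ("sora fc", "sky_fc", 10, "Trails in the Sky FC"),
  ("sora 1st", "sky_fc", 10, "Trails in the Sky the 1st"),
  ("sky fc", "sky_fc", 10, "Trails in the Sky FC"),
  ("nayuta", "nayuta", 10, "The Legend of Nayuta: Boundless Trails")]

-- Source B's `for keyword, game_id, priority, title in _RULES: if keyword in key: return …`
def scanRules (key : String) : List (String × String × Int × String) → Option String × Int × String
  | [] => (none, 0, "")
  | (kw, gid, pri, title) :: rest =>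
    if PySem.Str.isIn kw key then (some gid, pri, title) else scanRules key rest

def resolve_game_key_alt (raw : String) : Option String × Int × String :=
  scanRules (PySem.Str.lower (PySem.Str.strip raw)) rulesB

-- ===== PRECONDITION & SPEC =====
def Spec_resolve_game_key (raw : String) (out : Option String × Int × String) : Prop := out = resolve_game_key_alt raw
instance (raw : String) (out : Option String × Int × String) : Decidable (Spec_resolve_game_key raw out) := by unfold Spec_resolve_game_key; infer_instance

-- ===== CLAIM (what is proved, stated in full; the proofs are below) =====
def Claim_equal_resolve_game_key : Prop := ∀ (raw : String), Dom_resolve_game_key raw → Spec_resolve_game_key raw (resolve_game_key raw)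

-- ===== LEMMAS AND PROOFS =====

-- B's rows viewed as (keyword, value-tuple) pairs, to relate the two traversals
def rulesKV : List (String × (Option String × Int × String)) :=
  rulesB.map (fun r => (r.1, (some r.2.1, r.2.2.1, r.2.2.2)))

-- Proof-side stable descending insertion sort (used only to relate the two traversals).
def insD (e : String × (Option String × Int × String)) :
    List (String × (Option String × Int × String)) → List (String × (Option String × Int × String))
  | [] => [e]
  | x :: xs => if e.2.2.1 < x.2.2.1 then x :: insD e xs else e :: x :: xs

def isortD : List (String × (Option String × Int × String)) → List (String × (Option String × Int × String))
  | [] => []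
  | e :: xs => insD e (isortD xs)

-- A's loop body commutes across adjacent entries of strictly different priority.
theorem stepA_comm (key : String) (e1 e2 : String × (Option String × Int × String))
    (h : e1.2.2.1 < e2.2.2.1) (b : Option String × Int × String) :
    stepA key (stepA key b e1) e2 = stepA key (stepA key b e2) e1 := by
  unfold stepA
  rcases hi1 : PySem.Str.isIn e1.1 key <;> rcases hi2 : PySem.Str.isIn e2.1 key <;>
    simp only [Bool.false_and, Bool.true_and] <;> split_ifs <;>
    simp_all <;> omega

theorem foldl_insD (key : String) :
    ∀ (l : List (String × (Option String × Int × String))) (e : String × (Option String × Int × String))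
      (b : Option String × Int × String),
      (insD e l).foldl (stepA key) b = (e :: l).foldl (stepA key) b := by
  intro l
  induction l with
  | nil => intro e b; rfl
  | cons x xs ih =>
    intro e b
    by_cases h : e.2.2.1 < x.2.2.1
    · simp only [insD, if_pos h, List.foldl_cons]
      rw [ih, List.foldl_cons, stepA_comm key e x h b]
    · simp [insD, if_neg h]

theorem foldl_isortD (key : String) :
    ∀ (l : List (String × (Option String × Int × String))) (b : Option String × Int × String),
      (isortD l).foldl (stepA key) b = l.foldl (stepA key) b := by
  intro l
  induction l with
  | nil => intro b; rfl
  | cons e xs ih =>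
    intro b
    simp only [isortD]
    rw [foldl_insD, List.foldl_cons, List.foldl_cons, ih]

-- once the running best has priority ≥ every remaining entry, the fold is constant
theorem foldl_stay (key : String) :
    ∀ (l : List (String × (Option String × Int × String))) (b : Option String × Int × String),
      (∀ kv ∈ l, kv.2.2.1 ≤ b.2.1) → l.foldl (stepA key) b = b := by
  intro l
  induction l with
  | nil => intro b _; rfl
  | cons x xs ih =>
    intro b h
    have hx : x.2.2.1 ≤ b.2.1 := h x (by simp)
    have : stepA key b x = b := by
      unfold stepA
      split_ifs with hc
      · simp only [Bool.and_eq_true, decide_eq_true_eq] at hc; omega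
      · rfl
    rw [List.foldl_cons, this]
    exact ih b (fun kv hkv => h kv (by simp [hkv]))

-- fold-with-strict-max over a priority-nonincreasing, positive-priority pair list = B's scan
-- of the corresponding flat rows (first match, early exit)
theorem foldl_sorted_eq_scan (key : String) :
    ∀ (l : List (String × String × Int × String)),
      (l.map (fun r => (r.1, (some r.2.1, r.2.2.1, r.2.2.2)))).Pairwise (fun a b => b.2.2.1 ≤ a.2.2.1) →
      (∀ r ∈ l, (0 : Int) < r.2.2.1) →
      (l.map (fun r => (r.1, (some r.2.1, r.2.2.1, r.2.2.2)))).foldl (stepA key) (none, 0, "") =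
        scanRules key l := by
  intro l
  induction l with
  | nil => intro _ _; rfl
  | cons x xs ih =>
    intro hp hpos
    obtain ⟨kw, gid, pri, title⟩ := x
    rw [List.map_cons] at hp
    rcases List.pairwise_cons.mp hp with ⟨hx, hxs⟩
    rcases hi : PySem.Str.isIn kw key with _ | _
    · have hi' : PySem.Chars.isIn kw.toList key.toList = false := by simpa using hi
      have hstep : stepA key (none, 0, "") (kw, (some gid, pri, title)) = (none, 0, "") := by
        simp [stepA, hi']
      simp only [List.map_cons, List.foldl_cons, hstep, scanRules, PySem.Str.isIn_eq, hi',
        Bool.false_eq_true, if_false]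
      exact ih hxs (fun r hr => hpos r (List.mem_cons_of_mem _ hr))
    · have hi' : PySem.Chars.isIn kw.toList key.toList = true := by simpa using hi
      have h0 : (0 : Int) < pri := hpos (kw, gid, pri, title) (List.mem_cons_self ..)
      have hstep : stepA key (none, 0, "") (kw, (some gid, pri, title)) = (some gid, pri, title) := by
        simp [stepA, hi']; omega
      simp only [List.map_cons, List.foldl_cons, hstep, scanRules, PySem.Str.isIn_eq, hi', if_true]
      exact foldl_stay key _ _ (fun kv hkv => hx kv hkv)

-- the insertion sort of A's items is exactly B's pre-sorted table (as pairs)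
set_option maxHeartbeats 2000000 in
theorem isortD_items_eq : isortD gameMap.items = rulesKV := by decide

set_option maxHeartbeats 2000000 in
theorem rulesKV_pairwise :
    rulesKV.Pairwise (fun a b => b.2.2.1 ≤ a.2.2.1) := by decide

set_option maxHeartbeats 2000000 in
theorem rules_pos : ∀ r ∈ rulesB, (0 : Int) < r.2.2.1 := by decide

-- every exact GAME_MAP key hits its own value first in B's scan
set_option maxHeartbeats 4000000 in
theorem exact_keys_agree : ∀ kv ∈ gameMap.items, scanRules kv.1 rulesB = kv.2 := by decide

-- ===== VERDICT (by name: the statement is the Claim_ definition above) =====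
theorem resolve_game_key_spec : Claim_equal_resolve_game_key := by
  intro raw _
  show resolve_game_key raw = resolve_game_key_alt raw
  simp only [resolve_game_key, resolve_game_key_alt]
  generalize PySem.Str.lower (PySem.Str.strip raw) = key
  rcases hg : PySem.Dict.get? gameMap key with _ | v
  · rw [← foldl_isortD key gameMap.items, isortD_items_eq]
    exact foldl_sorted_eq_scan key rulesB (by simpa [rulesKV] using rulesKV_pairwise) rules_pos
  · have hmem := PySem.Dict.mem_items_of_get?_eq_some gameMap hg
    exact (exact_keys_agree (key, v) hmem).symm
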